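-- pv_equiv track=rewrite | github.com/blacksegal/ascon_weak_key_analysis | weak_keys_small.py | count_keys_WK_small
-- ===== SOURCE A (Python) =====
-- def combs(iterable, r):
--     pool = tuple(iterable)
--     n = len(pool)
--     if r > n:
--         return
--     indices = list(range(r))
--     yield list(pool[i] for i in indices)
--     while True:
--         for i in reversed(range(r)):
--             if indices[i] != i + n - r:
--                 break
--         else:
--             return
--         indices[i] += 1
--         for j in range(i + 1, r):
--             indices[j] = indices[j - 1] + 1
--         yield list(pool[i] for i in indices)
--
-- def count_keys_WK_small(n, J, d):
--     II = list(combs([i for i in range(n)], d))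
--     l = '{0:0' + str(2 * n) + 'b}'
--     KEYS = []
--     for XX in II:
--         YY = list(set([i for i in range(n)]) - set(XX))
--         for i in range(1 << (2 * n)):
--             B = [int(z) for z in l.format(i)]
--             count = 0
--             for x in XX:
--                 if x in J:
--                     if B[x] != B[x + n]:
--                         count = count + 1
--                 else:
--                     if B[x] == B[x + n]:
--                         count = count + 1
--             for y in YY:
--                 if y in J:
--                     count = count + 1
--                 else:
--                     if B[y] != B[y + n]:
--                         count = count + 1
--             if count == n:
--                 KEYS.append(i)
--
--     return KEYS
-- ===== SOURCE B (Python) =====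
-- # B: same subset enumeration (module's combs helper reused), but keys are built
-- # output-sensitively: for each high half h every value is allowed, and the low half
-- # is the product of per-position allowed bits, emitted in increasing order --
-- # no scan over all 2**(2n) candidates.
-- def combs(iterable, r):
--     pool = tuple(iterable)
--     n = len(pool)
--     if r > n:
--         return
--     indices = list(range(r))
--     yield list(pool[i] for i in indices)
--     while True:
--         for i in reversed(range(r)):
--             if indices[i] != i + n - r:
--                 break
--         else:
--             return
--         indices[i] += 1
--         for j in range(i + 1, r):
--             indices[j] = indices[j - 1] + 1
--         yield list(pool[i] for i in indices)
--
-- def count_keys_WK_small(n, J, d):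
--     keys = []
--     for XX in combs(list(range(n)), d):
--         in_XX = set(XX)
--         for h in range(2 ** n):
--             lows = [0]
--             for t in range(n):
--                 b = (h >> (n - 1 - t)) & 1
--                 if t in in_XX:
--                     opts = [1 - b] if t in J else [b]
--                 else:
--                     opts = [0, 1] if t in J else [1 - b]
--                 lows = [lo * 2 + c for lo in lows for c in opts]
--             for lo in lows:
--                 keys.append(h * (2 ** n) + lo)
--     return keys
-- ===== Notes on version B (the rewrite author's own statement) =====
-- stated objective: alternative
-- what changed: B keeps the module's combs subset enumerator but replaces A's scan of all 2^(2n) candidate keys (formatting each as a binary string and counting satisfied positions) by an output-sensitive construction: for each subset and each high half h it builds exactly the allowed low halves as a product of per-position allowed bits, emitting keys directly in increasing order; intended as faster (measured ~90x at n=16), but unconfirmed at larger sizes where the exponential-size output makes both exceed the budget.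
import Mathlib
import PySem

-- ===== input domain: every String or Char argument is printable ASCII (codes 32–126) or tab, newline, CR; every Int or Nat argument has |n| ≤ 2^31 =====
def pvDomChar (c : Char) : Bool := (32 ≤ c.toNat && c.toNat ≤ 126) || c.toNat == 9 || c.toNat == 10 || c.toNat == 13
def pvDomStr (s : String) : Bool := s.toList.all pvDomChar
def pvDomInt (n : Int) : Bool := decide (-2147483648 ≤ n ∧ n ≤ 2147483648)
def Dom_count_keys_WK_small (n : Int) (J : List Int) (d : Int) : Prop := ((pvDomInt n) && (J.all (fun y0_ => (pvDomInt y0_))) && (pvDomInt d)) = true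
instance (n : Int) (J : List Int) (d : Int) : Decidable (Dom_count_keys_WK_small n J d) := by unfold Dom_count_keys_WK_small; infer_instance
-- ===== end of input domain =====

-- B replaces A's scan of all 2^(2n) candidate keys by an output-sensitive per-position
-- construction of exactly the valid keys; both reuse the module's `combs` helper.

-- ===== PORT A =====
-- helpers: transliteration of the module's hand-written `combs` generator.
-- `[pool[i] for i in indices]`; pool[i] is always in range when evaluated (loop invariant), so the getD default is never used
def combsYield (pool : List Int) (indices : List Int) : List Int :=
  indices.map (fun i => PySem.List.pyGetD pool i 0)

-- `for i in reversed(range(r)): if indices[i] != i + n - r: break / else: return`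
def combsFind (indices : List Int) (np r : Int) : Option Int :=
  (PySem.List.pyRange 0 r 1).reverse.find? (fun i => PySem.List.pyGetD indices i 0 != i + np - r)

-- `indices[i] += 1; for j in range(i + 1, r): indices[j] = indices[j - 1] + 1`
def combsNext (indices : List Int) (i r : Int) : List Int :=
  let ind := PySem.List.pySetD indices i (PySem.List.pyGetD indices i 0 + 1)
  (PySem.List.pyRange (i + 1) r 1).foldl
    (fun ind j => PySem.List.pySetD ind j (PySem.List.pyGetD ind (j - 1) 0 + 1)) ind

-- the `while True` loop; fuel 2^|pool| bounds the number of iterations (≤ C(|pool|, r)), so it is never exhausted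
def combsLoop (pool : List Int) (np r : Int) : Nat → List Int → List (List Int)
  | 0, _ => []
  | fuel + 1, indices =>
    match combsFind indices np r with
    | none => []
    | some i =>
      let ind' := combsNext indices i r
      combsYield pool ind' :: combsLoop pool np r fuel ind'

def combsA (pool : List Int) (r : Int) : List (List Int) :=
  let np : Int := PySem.List.len pool
  if r > np then []
  else combsYield pool (PySem.List.pyRange 0 r 1) ::
       combsLoop pool np r (2 ^ pool.length) (PySem.List.pyRange 0 r 1)

-- `[int(z) for z in ('{0:0' + str(w) + 'b}').format(i)]` — exact for the values formatted here (0 ≤ i):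
-- the format zero-pads format(i,'b') (= PySem.Int.toBinChars) on the left to width w,
-- and int(z) on a binary digit char z is its value (z.toNat - 48)
def fmtBin (w : Int) (i : Int) : List Int :=
  let ds := PySem.Int.toBinChars i
  (List.replicate (w.toNat - ds.length) '0' ++ ds).map (fun c => (c.toNat : Int) - 48)

-- `1 << (2*n)` / `1 << n` are 2^(2n) / 2^n; for n < 0 Python would raise, but those loops are then unreached (Pre_)
def count_keys_WK_small (n : Int) (J : List Int) (d : Int) : List Int :=
  let II := combsA (PySem.List.pyRange 0 n 1) d
  II.foldl
    (fun KEYS XX =>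
      -- YY = list(set(range(n)) - set(XX)); only ever summed over, so the result does not depend on YY's order
      let YY : List Int :=
        PySem.Set.diff (PySem.Set.ofList (PySem.List.pyRange 0 n 1)) (PySem.Set.ofList XX)
      (PySem.List.pyRange 0 ((2 : Int) ^ (2 * n).toNat) 1).foldl
        (fun KEYS i =>
          let B := fmtBin (2 * n) i
          let count1 : Int :=
            XX.foldl (fun c x =>
              if x ∈ J then
                (if PySem.List.pyGetD B x 0 ≠ PySem.List.pyGetD B (x + n) 0 then c + 1 else c)
              else
                (if PySem.List.pyGetD B x 0 = PySem.List.pyGetD B (x + n) 0 then c + 1 else c)) 0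
          let count2 : Int :=
            YY.foldl (fun c y =>
              if y ∈ J then c + 1
              else (if PySem.List.pyGetD B y 0 ≠ PySem.List.pyGetD B (y + n) 0 then c + 1 else c)) count1
          if count2 = n then KEYS ++ [i] else KEYS)
        KEYS)
    []

-- ===== PORT B =====
-- same combs helper (combsA); keys built per high half h from per-position allowed low bits
-- `(h >> (n-1-t)) & 1` : the shift amount n-1-t is ≥ 0 whenever evaluated (t < n)
def count_keys_WK_small_alt (n : Int) (J : List Int) (d : Int) : List Int :=
  (combsA (PySem.List.pyRange 0 n 1) d).foldl
    (fun keys XX =>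
      let inXX := PySem.Set.ofList XX
      (PySem.List.pyRange 0 ((2 : Int) ^ n.toNat) 1).foldl
        (fun keys (h : Int) =>
          let lows := (PySem.List.pyRange 0 n 1).foldl
            (fun lows t =>
              let b := PySem.Int.band (h >>> (n - 1 - t).toNat) 1
              let opts := if PySem.Set.contains inXX t then (if t ∈ J then [1 - b] else [b])
                          else (if t ∈ J then [0, 1] else [1 - b])
              lows.flatMap (fun lo => opts.map (fun c => lo * 2 + c))) [0]
          lows.foldl (fun keys lo => keys ++ [h * (2 : Int) ^ n.toNat + lo]) keys)
        keys)
    []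

-- ===== PRECONDITION & SPEC =====
-- A raises for n < 0 with d ≤ 0 (negative shift count in `1 << (2*n)`); with d > 0 those loops are unreached and A returns []
def Pre_count_keys_WK_small (n : Int) (J : List Int) (d : Int) : Prop := 0 ≤ n ∨ 0 < d
instance (n : Int) (J : List Int) (d : Int) : Decidable (Pre_count_keys_WK_small n J d) := by unfold Pre_count_keys_WK_small; infer_instance
def pvWitness_count_keys_WK_small : Int × List Int × Int := (2, [0], 1)
def Spec_count_keys_WK_small (n : Int) (J : List Int) (d : Int) (out : List Int) : Prop := out = count_keys_WK_small_alt n J d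
instance (n : Int) (J : List Int) (d : Int) (out : List Int) : Decidable (Spec_count_keys_WK_small n J d out) := by unfold Spec_count_keys_WK_small; infer_instance

-- ===== CLAIM (what is proved, stated in full; the proofs are below) =====
def Claim_equal_count_keys_WK_small : Prop := ∀ (n : Int) (J : List Int) (d : Int), Dom_count_keys_WK_small n J d → Pre_count_keys_WK_small n J d → Spec_count_keys_WK_small n J d (count_keys_WK_small n J d)

-- ===== LEMMAS AND PROOFS =====

-- proof-side definitions: bits, the shared per-position condition, and semantic views of the loops
def pvBitI (m k : ℕ) : ℕ := m / 2 ^ k % 2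

def pvBchars (m : ℕ) : List Char :=
  if m = 0 then ['0'] else ((Nat.digits 2 m).map Nat.digitChar).reverse

def pvSpecL (L m : ℕ) : List Char :=
  (List.range L).map (fun t => Nat.digitChar (m / 2 ^ (L - 1 - t) % 2))

def pvCond (J XX : List Int) (t : Int) (u v : ℕ) : Prop :=
  if t ∈ XX then (if t ∈ J then u ≠ v else u = v) else (t ∈ J ∨ u ≠ v)

def pvOpts (n : Int) (J XX : List Int) (h t : Int) : List Int :=
  let b := PySem.Int.band (h >>> (n - 1 - t).toNat) 1
  if PySem.Set.contains (PySem.Set.ofList XX) t then (if t ∈ J then [1 - b] else [b])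
  else (if t ∈ J then [0, 1] else [1 - b])

def pvLows (n : Int) (J XX : List Int) (h : Int) (m : ℕ) : List Int :=
  (PySem.List.pyRange 0 (m : Int) 1).foldl
    (fun lows t => lows.flatMap (fun lo => (pvOpts n J XX h t).map (fun c => lo * 2 + c))) [0]

def pvPP (n : Int) (J XX : List Int) (i : Int) : Prop :=
  ∀ t : ℕ, t < n.toNat →
    pvCond J XX (t : Int) (pvBitI i.toNat (2 * n.toNat - 1 - t)) (pvBitI i.toNat (n.toNat - 1 - t))

def pvInv (np r : Int) (ind : List Int) : Prop :=
  ind.length = r.toNat ∧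
  (∀ k, (hk : k < ind.length) → (k : Int) ≤ ind[k] ∧ ind[k] ≤ (k : Int) + np - r) ∧
  ind.Pairwise (· < ·)

lemma pvBchars_step (m : ℕ) (h : 2 ≤ m) :
    pvBchars m = pvBchars (m / 2) ++ [Nat.digitChar (m % 2)] := by
  unfold pvBchars
  have h0 : m ≠ 0 := by omega
  have h2 : m / 2 ≠ 0 := by omega
  rw [if_neg h0, if_neg h2, Nat.digits_def' (by norm_num) (by omega)]
  simp

lemma pvBchars_lt_two (m : ℕ) (h : m < 2) : pvBchars m = [Nat.digitChar m] := by
  interval_cases m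
  · rfl
  · unfold pvBchars
    rw [if_neg (by omega), Nat.digits_def' (b := 2) (by norm_num) (by omega)]
    simp

lemma pvToDigitsCore_eq (f : ℕ) : ∀ (m : ℕ) (acc : List Char), m < 2 ^ f →
    Nat.toDigitsCore 2 (f + 1) m acc = pvBchars m ++ acc := by
  induction f with
  | zero =>
    intro m acc hm
    interval_cases m
    simp [Nat.toDigitsCore, pvBchars]
    rfl
  | succ f ih =>
    intro m acc hm
    rw [Nat.toDigitsCore]
    by_cases h2 : m / 2 = 0
    · have : m < 2 := by omega
      rw [if_pos h2, pvBchars_lt_two m this, Nat.mod_eq_of_lt this]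
      simp
    · rw [if_neg h2]
      have hdiv : m / 2 < 2 ^ f := by
        have : m < 2 ^ f * 2 := by rw [← pow_succ]; exact hm
        omega
      rw [ih (m / 2) _ hdiv, pvBchars_step m (by omega)]
      simp

lemma pvToDigits_two (m : ℕ) : Nat.toDigits 2 m = pvBchars m := by
  have := pvToDigitsCore_eq m m [] Nat.lt_two_pow_self
  simpa [Nat.toDigits] using this


lemma pvSpecL_succ (L m : ℕ) :
    pvSpecL (L + 1) m = pvSpecL L (m / 2) ++ [Nat.digitChar (m % 2)] := by
  unfold pvSpecL
  rw [List.range_succ, List.map_append]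
  congr 1
  · apply List.map_congr_left
    intro t ht
    have ht' : t < L := List.mem_range.mp ht
    have he : L + 1 - 1 - t = (L - 1 - t) + 1 := by omega
    rw [he, pow_succ']
    rw [Nat.div_div_eq_div_mul]
  · simp

lemma pvSpecL_zero_val (L : ℕ) : pvSpecL L 0 = List.replicate L '0' := by
  unfold pvSpecL
  simp only [Nat.zero_div, Nat.zero_mod]
  rw [List.map_const', List.length_range]
  rfl


lemma pvBchars_len (L m : ℕ) (hL : 0 < L) (h : m < 2 ^ L) : (pvBchars m).length ≤ L := by
  rw [← pvToDigits_two]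
  exact Nat.toDigits_length 2 m L hL h

lemma pvPadded_eq_specL (L : ℕ) (hL : 0 < L) : ∀ m, m < 2 ^ L →
    List.replicate (L - (pvBchars m).length) '0' ++ pvBchars m = pvSpecL L m := by
  induction L with
  | zero => omega
  | succ L ih =>
    intro m hm
    by_cases hm2 : m < 2
    · rw [pvBchars_lt_two m hm2]
      have h2 : m / 2 = 0 := by omega
      have h3 : m % 2 = m := by omega
      rw [pvSpecL_succ, h2, h3, pvSpecL_zero_val]
      simp
    · have hL0 : 0 < L := by
        by_contra h
        have : L = 0 := by omega
        subst this
        simp at hm; omega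
      rw [pvBchars_step m (by omega)]
      have hlen : (pvBchars (m / 2)).length ≤ L := by
        apply pvBchars_len L _ hL0
        have : m < 2 ^ L * 2 := by rw [← pow_succ]; exact hm
        omega
      have hcnt : L + 1 - ((pvBchars (m / 2)).length + 1) = L - (pvBchars (m / 2)).length := by omega
      rw [List.length_append, List.length_singleton, hcnt, pvSpecL_succ]
      rw [← List.append_assoc]
      congr 1
      refine ih hL0 (m / 2) ?_
      have : m < 2 ^ L * 2 := by rw [← pow_succ]; exact hm
      omega


lemma pvFmtBin_digit (N M : ℕ) (hM : M < 2 ^ N) (t : ℕ) (ht : t < N) :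
    PySem.List.pyGetD (fmtBin (N : Int) (M : Int)) (t : Int) 0 = (pvBitI M (N - 1 - t) : Int) := by
  have hbc : PySem.Int.toBinChars (M : Int) = pvBchars M := by
    unfold PySem.Int.toBinChars
    rw [if_neg (by omega)]
    simp [pvToDigits_two]
  unfold fmtBin
  rw [hbc]
  have hN : ((N : Int)).toNat = N := Int.toNat_natCast N
  simp only []
  rw [hN, pvPadded_eq_specL N (by omega) M hM]
  rw [PySem.List.pyGetD_natCast]
  unfold pvSpecL
  rw [List.map_map, List.getD_eq_getElem?_getD, List.getElem?_map]
  rw [List.getElem?_range ht]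
  simp only [Option.map_some, Option.getD_some, Function.comp_apply]
  unfold pvBitI
  rcases Nat.mod_two_eq_zero_or_one (M / 2 ^ (N - 1 - t)) with h | h <;> rw [h] <;> rfl


lemma pvGetD_set (l : List Int) (m k : ℕ) (v : Int) :
    (l.set m v).getD k 0 = if k = m ∧ m < l.length then v else l.getD k 0 := by
  rw [List.getD_eq_getElem?_getD, List.getD_eq_getElem?_getD, List.getElem?_set]
  split_ifs <;> simp_all

lemma pvNext_fold (R : ℕ) (v : Int) (q : ℕ) : ∀ (m : ℕ) (st : List Int), st.length = R →
    q < m → m ≤ R → st.getD (m - 1) 0 = v + ((m - 1 - q : ℕ) : Int) →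
    (((PySem.List.pyRange (m : Int) (R : Int) 1).foldl
        (fun ind j => PySem.List.pySetD ind j (PySem.List.pyGetD ind (j - 1) 0 + 1)) st).length = R ∧
     ∀ k : ℕ, k < R →
       (k < m → ((PySem.List.pyRange (m : Int) (R : Int) 1).foldl
          (fun ind j => PySem.List.pySetD ind j (PySem.List.pyGetD ind (j - 1) 0 + 1)) st).getD k 0 = st.getD k 0) ∧
       (m ≤ k → ((PySem.List.pyRange (m : Int) (R : Int) 1).foldl
          (fun ind j => PySem.List.pySetD ind j (PySem.List.pyGetD ind (j - 1) 0 + 1)) st).getD k 0 = v + ((k - q : ℕ) : Int))) := by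
  intro m
  induction hfuel : R - m generalizing m with
  | zero =>
    intro st hlen hqm hmR hst
    have hmR' : m = R := by omega
    subst hmR'
    rw [PySem.List.pyRange_one_eq_nil (by omega)]
    exact ⟨hlen, fun k hk => ⟨fun _ => rfl, fun hmk => by omega⟩⟩
  | succ fuel ih =>
    intro st hlen hqm hmR hst
    have hmR' : m < R := by omega
    have hcons : PySem.List.pyRange (m : Int) (R : Int) 1 = (m : Int) :: PySem.List.pyRange ((m : Int) + 1) (R : Int) 1 := by
      exact PySem.List.pyRange_one_cons (by exact_mod_cast hmR')
    rw [hcons, List.foldl_cons]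
    -- the new state
    set st' := PySem.List.pySetD st (m : Int) (PySem.List.pyGetD st ((m : Int) - 1) 0 + 1) with hst'
    have hget : PySem.List.pyGetD st ((m : Int) - 1) 0 = v + ((m - 1 - q : ℕ) : Int) := by
      have : ((m : Int) - 1) = ((m - 1 : ℕ) : Int) := by omega
      rw [this, PySem.List.pyGetD_natCast]
      exact hst
    have hst'eq : st' = st.set m (v + ((m - 1 - q : ℕ) : Int) + 1) := by
      rw [hst', hget]
      have : ((m : ℕ) : Int) = (m : Int) := rfl
      rw [← this, PySem.List.pySetD_natCast]
    have hlen' : st'.length = R := by rw [hst'eq, List.length_set, hlen]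
    have hmm : ((m + 1 : ℕ) : Int) = (m : Int) + 1 := by push_cast; ring
    have hstep : st'.getD (m + 1 - 1) 0 = v + ((m + 1 - 1 - q : ℕ) : Int) := by
      rw [hst'eq, pvGetD_set]
      rw [if_pos ⟨by omega, by omega⟩]
      have h1 : m + 1 - 1 - q = (m - 1 - q) + 1 := by omega
      rw [h1]
      push_cast
      ring
    have := ih (m + 1) (by omega) st' hlen' (by omega) (by omega) hstep
    rw [hmm] at this
    refine ⟨this.1, ?_⟩
    intro k hk
    constructor
    · intro hkm
      rw [(this.2 k hk).1 (by omega)]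
      rw [hst'eq, pvGetD_set, if_neg (by omega)]
    · intro hmk
      by_cases hkm1 : k = m
      · rw [(this.2 k hk).1 (by omega)]
        rw [hst'eq, pvGetD_set, if_pos ⟨hkm1, by omega⟩]
        have h1 : k - q = (m - 1 - q) + 1 := by omega
        rw [h1]; push_cast; ring
      · exact (this.2 k hk).2 (by omega)


lemma pvFind_some (np r : Int) (ind : List Int) (i : Int)
    (h : combsFind ind np r = some i) :
    0 ≤ i ∧ i < r ∧ PySem.List.pyGetD ind i 0 ≠ i + np - r ∧
      ∀ j, i < j → j < r → PySem.List.pyGetD ind j 0 = j + np - r := by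
  unfold combsFind at h
  have hmem : i ∈ (PySem.List.pyRange 0 r 1).reverse := List.mem_of_find?_eq_some h
  rw [List.mem_reverse, PySem.List.mem_pyRange_one] at hmem
  rw [List.find?_eq_some_iff_append] at h
  obtain ⟨hp, as, bs, hsplit, hall⟩ := h
  have hpair : ((PySem.List.pyRange 0 r 1).reverse).Pairwise (· > ·) := by
    rw [List.pairwise_reverse]
    exact PySem.List.pairwise_lt_pyRange_one 0 r
  rw [hsplit, List.pairwise_append] at hpair
  refine ⟨hmem.1, hmem.2, by simpa using hp, ?_⟩
  intro j hij hjr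
  have hjmem : j ∈ as ++ i :: bs := by
    rw [← hsplit, List.mem_reverse, PySem.List.mem_pyRange_one]
    omega
  rcases List.mem_append.mp hjmem with hja | hjc
  · have := hall j hja
    simpa using this
  · rw [List.mem_cons] at hjc
    rcases hjc with rfl | hjb
    · omega
    · exfalso
      have : i > j := (List.pairwise_cons.mp hpair.2.1).1 j hjb
      omega


lemma pvNext_inv (np r : Int) (ind : List Int) (i : Int)
    (hinv : pvInv np r ind) (hfind : combsFind ind np r = some i) :
    pvInv np r (combsNext ind i r) := by
  obtain ⟨hlen, hbnd, hpair⟩ := hinv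
  obtain ⟨hi0, hir, hne, -⟩ := pvFind_some np r ind i hfind
  have hr0 : 0 < r := by omega
  set q := i.toNat with hq
  have hiq : (q : Int) = i := Int.toNat_of_nonneg hi0
  have hR : ((r.toNat : ℕ) : Int) = r := Int.toNat_of_nonneg (by omega)
  have hqlen : q < ind.length := by rw [hlen]; omega
  have hv0 : PySem.List.pyGetD ind i 0 = ind[q] := by
    rw [← hiq, PySem.List.pyGetD_natCast, List.getD_eq_getElem ind 0 hqlen]
  set v0 := ind[q] with hv0def
  have hbq := hbnd q hqlen
  have hvne : v0 ≠ (q : Int) + np - r := by rw [hiq]; rw [hv0] at hne; exact hne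
  have hst : PySem.List.pySetD ind i (PySem.List.pyGetD ind i 0 + 1) = ind.set q (v0 + 1) := by
    rw [← hiq, PySem.List.pySetD_natCast, PySem.List.pyGetD_natCast, List.getD_eq_getElem ind 0 hqlen]
  have hlenst : (ind.set q (v0 + 1)).length = r.toNat := by rw [List.length_set]; exact hlen
  have hstep : (ind.set q (v0 + 1)).getD (q + 1 - 1) 0 = (v0 + 1) + ((q + 1 - 1 - q : ℕ) : Int) := by
    rw [pvGetD_set]
    rw [if_pos ⟨by omega, by omega⟩]
    simp
  have hfold := pvNext_fold r.toNat (v0 + 1) q (q + 1) (ind.set q (v0 + 1)) hlenst (by omega) (by omega) hstep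
  rw [show (((q + 1 : ℕ)) : Int) = i + 1 by omega, hR] at hfold
  unfold combsNext
  rw [hst]
  set res := (PySem.List.pyRange (i + 1) r 1).foldl
      (fun ind j => PySem.List.pySetD ind j (PySem.List.pyGetD ind (j - 1) 0 + 1)) (ind.set q (v0 + 1)) with hres
  have hreslen : res.length = r.toNat := hfold.1
  have hget : ∀ k : ℕ, k < r.toNat →
      res.getD k 0 = if k < q then ind.getD k 0 else v0 + 1 + ((k - q : ℕ) : Int) := by
    intro k hk
    by_cases hkq : k < q
    · rw [if_pos hkq, (hfold.2 k hk).1 (by omega), pvGetD_set, if_neg (by omega)]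
    · rw [if_neg hkq]
      by_cases hkq2 : k = q
      · rw [(hfold.2 k hk).1 (by omega), pvGetD_set, if_pos ⟨hkq2, by omega⟩]
        rw [hkq2]
        simp
      · rw [(hfold.2 k hk).2 (by omega)]
  have hgetE : ∀ (k : ℕ) (hk : k < res.length),
      res[k] = if k < q then ind.getD k 0 else v0 + 1 + ((k - q : ℕ) : Int) := by
    intro k hk
    rw [← List.getD_eq_getElem res 0 hk]
    exact hget k (by omega)
  refine ⟨hreslen, ?_, ?_⟩
  · intro k hk
    rw [hgetE k hk]
    by_cases hkq : k < q
    · rw [if_pos hkq]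
      have h2 : k < ind.length := by omega
      rw [List.getD_eq_getElem ind 0 h2]
      exact hbnd k h2
    · rw [if_neg hkq]
      have hkk : k < r.toNat := by omega
      constructor
      · have : (q : Int) ≤ v0 := hbq.1
        omega
      · have : v0 ≤ (q : Int) + np - r := hbq.2
        omega
  · rw [List.pairwise_iff_getElem]
    intro a b ha hb hab
    rw [hgetE a ha, hgetE b hb]
    have hpair' := List.pairwise_iff_getElem.mp hpair
    by_cases haq : a < q
    · by_cases hbq' : b < q
      · rw [if_pos haq, if_pos hbq']
        have h2a : a < ind.length := by omega
        have h2b : b < ind.length := by omega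
        rw [List.getD_eq_getElem ind 0 h2a, List.getD_eq_getElem ind 0 h2b]
        exact hpair' a b h2a h2b hab
      · rw [if_pos haq, if_neg hbq']
        have h2a : a < ind.length := by omega
        rw [List.getD_eq_getElem ind 0 h2a]
        have : ind[a] < v0 := hpair' a q h2a hqlen (by omega)
        omega
    · rw [if_neg haq, if_neg (by omega)]
      omega


lemma pvLoop_members (pool : List Int) (np r : Int) :
    ∀ (fuel : ℕ) (ind : List Int), pvInv np r ind →
      ∀ XX ∈ combsLoop pool np r fuel ind,
        ∃ ind', pvInv np r ind' ∧ XX = combsYield pool ind' := by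
  intro fuel
  induction fuel with
  | zero => intro ind _ XX hXX; simp [combsLoop] at hXX
  | succ fuel ih =>
    intro ind hinv XX hXX
    rw [combsLoop] at hXX
    cases hf : combsFind ind np r with
    | none => rw [hf] at hXX; simp at hXX
    | some i =>
      rw [hf] at hXX
      simp only [List.mem_cons] at hXX
      rcases hXX with rfl | hXX
      · exact ⟨combsNext ind i r, pvNext_inv np r ind i hinv hf, rfl⟩
      · exact ih (combsNext ind i r) (pvNext_inv np r ind i hinv hf) XX hXX

lemma pvYield_props (n r : Int) (ind : List Int)
    (hinv : pvInv (PySem.List.len (PySem.List.pyRange 0 n 1)) r ind) :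
    (combsYield (PySem.List.pyRange 0 n 1) ind).Pairwise (· < ·) ∧
      ∀ x ∈ combsYield (PySem.List.pyRange 0 n 1) ind, 0 ≤ x ∧ x < n := by
  obtain ⟨hlen, hbnd, hpair⟩ := hinv
  have hnplen : PySem.List.len (PySem.List.pyRange 0 n 1) = ((PySem.List.pyRange 0 n 1).length : Int) := PySem.List.len_eq _
  have hpl : (PySem.List.pyRange 0 n 1).length = (n - 0).toNat := PySem.List.length_pyRange_one 0 n
  -- every index is in range of pool and maps to itself
  have hrange : ∀ (k : ℕ) (hk : k < ind.length), 0 ≤ ind[k] ∧ ind[k] < ((PySem.List.pyRange 0 n 1).length : Int) := by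
    intro k hk
    obtain ⟨h1, h2⟩ := hbnd k hk
    have hk' : k < r.toNat := by omega
    have hr' : (k : Int) < r := by omega
    constructor
    · omega
    · rw [← hnplen]; omega
  have hid : ∀ (k : ℕ) (hk : k < ind.length), PySem.List.pyGetD (PySem.List.pyRange 0 n 1) ind[k] 0 = ind[k] := by
    intro k hk
    obtain ⟨h1, h2⟩ := hrange k hk
    rw [PySem.List.pyGetD_eq_getElem _ 0 h1 h2,
      PySem.List.getElem_pyRange_one 0 n ind[k].toNat (by omega)]
    omega
  have hyield : combsYield (PySem.List.pyRange 0 n 1) ind = ind := by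
    unfold combsYield
    have hc : ∀ x ∈ ind, PySem.List.pyGetD (PySem.List.pyRange 0 n 1) x 0 = x := by
      intro x hx
      obtain ⟨k, hk, rfl⟩ := List.mem_iff_getElem.mp hx
      exact hid k hk
    rw [List.map_congr_left hc]
    exact List.map_id ind
  rw [hyield]
  constructor
  · exact hpair
  · intro x hx
    obtain ⟨k, hk, rfl⟩ := List.mem_iff_getElem.mp hx
    obtain ⟨h1, h2⟩ := hrange k hk
    constructor
    · exact h1
    · rw [← hnplen] at h2
      omega

lemma pvCombsA_members (n d : Int) :
    ∀ XX ∈ combsA (PySem.List.pyRange 0 n 1) d,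
      XX.Pairwise (· < ·) ∧ ∀ x ∈ XX, 0 ≤ x ∧ x < n := by
  intro XX hXX
  unfold combsA at hXX
  by_cases hd : d > PySem.List.len (PySem.List.pyRange 0 n 1)
  · rw [if_pos hd] at hXX; simp at hXX
  · rw [if_neg hd] at hXX
    have hinv0 : pvInv (PySem.List.len (PySem.List.pyRange 0 n 1)) d (PySem.List.pyRange 0 d 1) := by
      refine ⟨by rw [PySem.List.length_pyRange_one]; omega, ?_, PySem.List.pairwise_lt_pyRange_one 0 d⟩
      intro k hk
      rw [PySem.List.getElem_pyRange_one 0 d k hk]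
      have hk' : k < (d - 0).toNat := by rw [← PySem.List.length_pyRange_one]; exact hk
      rw [PySem.List.len_eq] at hd ⊢
      constructor
      · omega
      · omega
    rcases List.mem_cons.mp hXX with rfl | hXX'
    · exact pvYield_props n d _ hinv0
    · obtain ⟨ind', hinv', rfl⟩ := pvLoop_members _ _ _ _ _ hinv0 XX hXX'
      exact pvYield_props n d ind' hinv'


lemma pvBand_one_cases (a : Int) : PySem.Int.band a 1 = 0 ∨ PySem.Int.band a 1 = 1 := by
  rw [PySem.Int.band_one]
  have h1 := PySem.Int.mod_nonneg a (b := 2) (by omega)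
  have h2 := PySem.Int.mod_lt a (b := 2) (by omega)
  omega

lemma pvOpts_cases (n : Int) (J XX : List Int) (h t : Int) :
    ∀ c ∈ pvOpts n J XX h t, c = 0 ∨ c = 1 := by
  intro c hc
  unfold pvOpts at hc
  rcases pvBand_one_cases (h >>> (n - 1 - t).toNat) with hb | hb <;>
    (simp only [hb] at hc) <;> split_ifs at hc <;> simp at hc <;> omega

lemma pvOpts_pairwise (n : Int) (J XX : List Int) (h t : Int) :
    (pvOpts n J XX h t).Pairwise (· < ·) := by
  unfold pvOpts
  split_ifs <;> simp

lemma pvContains_iff (XX : List Int) (t : Int) :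
    PySem.Set.contains (PySem.Set.ofList XX) t = true ↔ t ∈ XX := by
  show List.contains _ t = true ↔ _
  rw [List.contains_iff_mem, PySem.Set.mem_ofList]

lemma pvShift_bit (H : ℕ) (k : ℕ) : PySem.Int.band ((H : Int) >>> k) 1 = (pvBitI H k : Int) := by
  have h1 : ((H : Int) >>> k) = ((H >>> k : ℕ) : Int) := rfl
  rw [h1]
  have h2 : (1 : Int) = ((1 : ℕ) : Int) := rfl
  rw [h2, PySem.Int.band_natCast]
  unfold pvBitI
  rw [Nat.and_one_is_mod, Nat.shiftRight_eq_div_pow]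

lemma pvOpts_mem (n : Int) (hn : 0 ≤ n) (J XX : List Int) (H : ℕ) (t : ℕ) (ht : t < n.toNat)
    (v : ℕ) (hv : v < 2) :
    ((v : Int) ∈ pvOpts n J XX (H : Int) (t : Int) ↔
      pvCond J XX (t : Int) (pvBitI H (n.toNat - 1 - t)) v) := by
  have hu2 : pvBitI H (n.toNat - 1 - t) < 2 := Nat.mod_lt _ (by omega)
  unfold pvOpts pvCond
  have hsh : (n - 1 - (t : Int)).toNat = n.toNat - 1 - t := by omega
  rw [hsh, pvShift_bit H (n.toNat - 1 - t)]
  set u := pvBitI H (n.toNat - 1 - t) with hu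
  by_cases hX : (t : Int) ∈ XX
  · rw [if_pos ((pvContains_iff XX t).mpr hX), if_pos hX]
    by_cases hJ : (t : Int) ∈ J
    · rw [if_pos hJ, if_pos hJ]
      simp only [List.mem_singleton]
      omega
    · rw [if_neg hJ, if_neg hJ]
      simp only [List.mem_singleton]
      omega
  · rw [if_neg (by rw [pvContains_iff]; exact hX), if_neg hX]
    by_cases hJ : (t : Int) ∈ J
    · rw [if_pos hJ]
      simp only [List.mem_cons]
      constructor
      · intro _; exact Or.inl hJ
      · intro _; omega
    · rw [if_neg hJ]
      simp only [List.mem_singleton]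
      constructor
      · intro h'; exact Or.inr (by omega)
      · intro h'
        rcases h' with h' | h'
        · exact absurd h' hJ
        · omega


lemma pvLows_succ (n : Int) (J XX : List Int) (h : Int) (m : ℕ) :
    pvLows n J XX h (m + 1) =
      (pvLows n J XX h m).flatMap (fun lo => (pvOpts n J XX h (m : Int)).map (fun c => lo * 2 + c)) := by
  unfold pvLows
  have hc : ((m + 1 : ℕ) : Int) = (m : Int) + 1 := by push_cast; ring
  rw [hc, PySem.List.pyRange_one_succ_right (by positivity), List.foldl_append, List.foldl_cons, List.foldl_nil]

lemma pvBitI_double (v c k : ℕ) (hc : c < 2) : pvBitI (2 * v + c) (k + 1) = pvBitI v k := by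
  unfold pvBitI
  have h1 : (2 * v + c) / 2 = v := by omega
  rw [pow_succ', ← Nat.div_div_eq_div_mul, h1]

lemma pvBitI_zero (m : ℕ) : pvBitI m 0 = m % 2 := by
  unfold pvBitI; simp

lemma pvLows_props (n : Int) (hn : 0 ≤ n) (J XX : List Int) (H : ℕ) :
    ∀ (m : ℕ), m ≤ n.toNat →
    (pvLows n J XX (H : Int) m).Pairwise (· < ·) ∧
    (∀ lo ∈ pvLows n J XX (H : Int) m, ∃ v : ℕ, lo = (v : Int) ∧ v < 2 ^ m) ∧
    (∀ v : ℕ, v < 2 ^ m →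
      ((v : Int) ∈ pvLows n J XX (H : Int) m ↔
        ∀ s : ℕ, s < m → pvCond J XX (s : Int) (pvBitI H (n.toNat - 1 - s)) (pvBitI v (m - 1 - s)))) := by
  intro m
  induction m with
  | zero =>
    intro _
    have h0 : pvLows n J XX (H : Int) 0 = [0] := by
      unfold pvLows
      rw [PySem.List.pyRange_one_eq_nil (by omega)]
      rfl
    rw [h0]
    refine ⟨List.pairwise_singleton _ _, ?_, ?_⟩
    · intro lo hlo
      simp at hlo
      exact ⟨0, by simp [hlo]⟩
    · intro v hv
      have : v = 0 := by omega
      subst this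
      simp
  | succ m ih =>
    intro hm1
    obtain ⟨hpw, hbound, hmem⟩ := ih (by omega)
    rw [pvLows_succ]
    refine ⟨?_, ?_, ?_⟩
    · rw [List.pairwise_flatMap]
      constructor
      · intro lo _
        exact List.Pairwise.map _ (fun a b hab => by omega) (pvOpts_pairwise n J XX (H : Int) (m : Int))
      · apply hpw.imp_of_mem
        intro lo1 lo2 h1 h2 hlt x hx y hy
        obtain ⟨c1, hc1, rfl⟩ := List.mem_map.mp hx
        obtain ⟨c2, hc2, rfl⟩ := List.mem_map.mp hy
        rcases pvOpts_cases n J XX _ _ c1 hc1 with h | h <;>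
          rcases pvOpts_cases n J XX _ _ c2 hc2 with h' | h' <;> omega
    · intro lo' hlo'
      obtain ⟨lo, hlo, hx⟩ := List.mem_flatMap.mp hlo'
      obtain ⟨c, hc, rfl⟩ := List.mem_map.mp hx
      obtain ⟨v, rfl, hv⟩ := hbound lo hlo
      rcases pvOpts_cases n J XX _ _ c hc with rfl | rfl
      · exact ⟨2 * v, by push_cast; ring, by omega⟩
      · exact ⟨2 * v + 1, by push_cast; ring, by omega⟩
    · intro w hw
      rw [List.mem_flatMap]
      constructor
      · rintro ⟨lo, hlo, hx⟩
        obtain ⟨c, hc, heq⟩ := List.mem_map.mp hx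
        obtain ⟨v, rfl, hv⟩ := hbound lo hlo
        have hcc := pvOpts_cases n J XX _ _ c hc
        -- w = 2v + c'
        have hcnat : ∃ cn : ℕ, cn < 2 ∧ c = (cn : Int) := by
          rcases hcc with rfl | rfl
          · exact ⟨0, by omega, rfl⟩
          · exact ⟨1, by omega, rfl⟩
        obtain ⟨cn, hcn2, rfl⟩ := hcnat
        have hw' : w = 2 * v + cn := by
          have : (w : Int) = (v : Int) * 2 + (cn : Int) := heq.symm
          push_cast at this
          omega
        subst hw'
        intro s hs
        by_cases hsm : s < m
        · have h1 : m + 1 - 1 - s = (m - 1 - s) + 1 := by omega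
          rw [h1, pvBitI_double v cn _ hcn2]
          exact (hmem v hv).mp hlo s hsm
        · have hsm' : s = m := by omega
          rw [show m + 1 - 1 - s = 0 from by omega, pvBitI_zero,
            show (2 * v + cn) % 2 = cn from by omega, hsm']
          exact (pvOpts_mem n hn J XX H m (by omega) cn hcn2).mp hc
      · intro hcond
        refine ⟨((w / 2 : ℕ) : Int), ?_, ?_⟩
        · apply (hmem (w / 2) (by omega)).mpr
          intro s hs
          have h1 := hcond s (by omega)
          have h2 : m + 1 - 1 - s = (m - 1 - s) + 1 := by omega
          rw [h2] at h1
          have h3 : pvBitI w ((m - 1 - s) + 1) = pvBitI (w / 2) (m - 1 - s) := by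
            have : 2 * (w / 2) + w % 2 = w := by omega
            conv_lhs => rw [← this]
            exact pvBitI_double (w / 2) (w % 2) _ (by omega)
          rw [← h3]
          exact h1
        · apply List.mem_map.mpr
          refine ⟨((w % 2 : ℕ) : Int), ?_, by push_cast; omega⟩
          have h1 := hcond m (by omega)
          rw [show m + 1 - 1 - m = 0 from by omega, pvBitI_zero] at h1
          exact (pvOpts_mem n hn J XX H m (by omega) (w % 2) (by omega)).mpr h1


lemma pvBitI_hi (H v N k : ℕ) (hv : v < 2 ^ N) : pvBitI (H * 2 ^ N + v) (N + k) = pvBitI H k := by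
  unfold pvBitI
  have h1 : (H * 2 ^ N + v) / 2 ^ N = H := by
    rw [add_comm, Nat.add_mul_div_right v H (Nat.two_pow_pos N), Nat.div_eq_of_lt hv]
    omega
  rw [pow_add, ← Nat.div_div_eq_div_mul, h1]

lemma pvBitI_lo (H v N k : ℕ) (hk : k < N) : pvBitI (H * 2 ^ N + v) k = pvBitI v k := by
  unfold pvBitI
  have hsplit : H * 2 ^ N = (H * 2 ^ (N - k) * 2 ^ k) := by
    rw [mul_assoc, ← pow_add]
    congr 2
    omega
  rw [hsplit, add_comm, Nat.add_mul_div_right _ _ (Nat.two_pow_pos k)]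
  have heven : H * 2 ^ (N - k) % 2 = 0 := by
    have : N - k = (N - k - 1) + 1 := by omega
    rw [this, pow_succ, ← mul_assoc, Nat.mul_mod_left]
  omega

lemma pvSortedExt (l₁ l₂ : List Int) (h₁ : l₁.Pairwise (· < ·)) (h₂ : l₂.Pairwise (· < ·))
    (hm : ∀ x, x ∈ l₁ ↔ x ∈ l₂) : l₁ = l₂ := by
  have hn₁ : l₁.Nodup := h₁.imp (fun h => ne_of_lt h)
  have hn₂ : l₂.Nodup := h₂.imp (fun h => ne_of_lt h)
  have hperm : l₁.Perm l₂ := (List.perm_ext_iff_of_nodup hn₁ hn₂).mpr hm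
  exact List.Perm.eq_of_pairwise (fun a b _ _ hab hba => by omega) h₁ h₂ hperm


lemma pvDigit_at (n : Int) (hn : 0 ≤ n) (M : ℕ) (hM : M < 2 ^ (2 * n.toNat)) (x : Int)
    (hx0 : 0 ≤ x) (hxn : x < n) :
    PySem.List.pyGetD (fmtBin (2 * n) (M : Int)) x 0
        = (pvBitI M (2 * n.toNat - 1 - x.toNat) : Int) ∧
    PySem.List.pyGetD (fmtBin (2 * n) (M : Int)) (x + n) 0
        = (pvBitI M (n.toNat - 1 - x.toNat) : Int) := by
  have h2n : 2 * n = ((2 * n.toNat : ℕ) : Int) := by omega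
  have hx : x = ((x.toNat : ℕ) : Int) := by omega
  have hxn' : x + n = (((x.toNat + n.toNat) : ℕ) : Int) := by omega
  constructor
  · rw [h2n, hx, pvFmtBin_digit (2 * n.toNat) M hM x.toNat (by omega)]
    rw [Int.toNat_natCast]
  · rw [h2n, hxn', pvFmtBin_digit (2 * n.toNat) M hM (x.toNat + n.toNat) (by omega)]
    congr 2
    omega


lemma pvYY_facts (n : Int) (XX : List Int)
    (hs : XX.Pairwise (· < ·)) (hm : ∀ x ∈ XX, 0 ≤ x ∧ x < n) :
    (∀ y, y ∈ (PySem.Set.diff (PySem.Set.ofList (PySem.List.pyRange 0 n 1)) (PySem.Set.ofList XX) : List Int)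
        ↔ (0 ≤ y ∧ y < n ∧ y ∉ XX)) ∧
    XX.length + (PySem.Set.diff (PySem.Set.ofList (PySem.List.pyRange 0 n 1)) (PySem.Set.ofList XX) : List Int).length
        = n.toNat := by
  have hofl : PySem.Set.ofList (PySem.List.pyRange 0 n 1) = PySem.List.pyRange 0 n 1 :=
    PySem.Set.ofList_eq_self_of_nodup _ (PySem.List.nodup_pyRange_one 0 n)
  have hdiff : (PySem.Set.diff (PySem.Set.ofList (PySem.List.pyRange 0 n 1)) (PySem.Set.ofList XX) : List Int)
      = (PySem.List.pyRange 0 n 1).filter (fun y => !(PySem.Set.ofList XX).contains y) := by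
    show PySem.Set.diff _ _ = _
    rw [PySem.Set.diff, hofl]
  have hcont : ∀ y : Int, ((PySem.Set.ofList XX).contains y = true) ↔ y ∈ XX := by
    intro y
    show List.contains _ y = true ↔ _
    rw [List.contains_iff_mem, PySem.Set.mem_ofList]
  constructor
  · intro y
    rw [hdiff, List.mem_filter, PySem.List.mem_pyRange_one]
    rw [Bool.not_eq_eq_eq_not, Bool.not_true, ← Bool.not_eq_true, hcont y]
    tauto
  · rw [hdiff]
    have hXXf : (PySem.List.pyRange 0 n 1).filter (fun y => (PySem.Set.ofList XX).contains y) = XX := by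
      apply pvSortedExt
      · exact (PySem.List.pairwise_lt_pyRange_one 0 n).filter _
      · exact hs
      · intro x
        rw [List.mem_filter, PySem.List.mem_pyRange_one, hcont x]
        constructor
        · tauto
        · intro hx
          exact ⟨⟨(hm x hx).1, (hm x hx).2⟩, hx⟩
    have h1 : ((PySem.List.pyRange 0 n 1).filter (fun y => (PySem.Set.ofList XX).contains y)).length
        + ((PySem.List.pyRange 0 n 1).filter (fun y => !(PySem.Set.ofList XX).contains y)).length
        = (PySem.List.pyRange 0 n 1).length := by
      exact Eq.symm (List.length_eq_length_filter_add _)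
    rw [hXXf] at h1
    rw [h1, PySem.List.length_pyRange_one]
    omega


-- A's count equals n exactly when every position satisfies its parity condition
lemma pvCount_iff (n : Int) (hn : 0 ≤ n) (J XX : List Int)
    (hs : XX.Pairwise (· < ·)) (hm : ∀ x ∈ XX, 0 ≤ x ∧ x < n)
    (i : Int) (hi0 : 0 ≤ i) (hi2 : i < (2 : Int) ^ (2 * n).toNat) :
    ((PySem.Set.diff (PySem.Set.ofList (PySem.List.pyRange 0 n 1)) (PySem.Set.ofList XX) : List Int).foldl
        (fun c y =>
          if y ∈ J then c + 1
          else (if PySem.List.pyGetD (fmtBin (2 * n) i) y 0 ≠ PySem.List.pyGetD (fmtBin (2 * n) i) (y + n) 0 then c + 1 else c))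
        (XX.foldl (fun c x =>
          if x ∈ J then
            (if PySem.List.pyGetD (fmtBin (2 * n) i) x 0 ≠ PySem.List.pyGetD (fmtBin (2 * n) i) (x + n) 0 then c + 1 else c)
          else
            (if PySem.List.pyGetD (fmtBin (2 * n) i) x 0 = PySem.List.pyGetD (fmtBin (2 * n) i) (x + n) 0 then c + 1 else c)) 0)
      = n ↔ pvPP n J XX i) := by
  obtain ⟨hymem, hylen⟩ := pvYY_facts n XX hs hm
  set YY : List Int := PySem.Set.diff (PySem.Set.ofList (PySem.List.pyRange 0 n 1)) (PySem.Set.ofList XX) with hYY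
  set B := fmtBin (2 * n) i with hB
  -- digits facts
  have hM : i.toNat < 2 ^ (2 * n.toNat) := by
    have h2 : (2 * n).toNat = 2 * n.toNat := by omega
    rw [h2] at hi2
    have : ((2 : Int) ^ (2 * n.toNat)) = ((2 ^ (2 * n.toNat) : ℕ) : Int) := by push_cast; ring
    omega
  have hicast : ((i.toNat : ℕ) : Int) = i := Int.toNat_of_nonneg hi0
  have hdig := fun (x : Int) (hx0 : 0 ≤ x) (hxn : x < n) => by
    have h := pvDigit_at n hn i.toNat hM x hx0 hxn
    rw [hicast] at h
    exact h
  -- the X-side fold as a countP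
  have hqX : (fun (c : Int) (x : Int) =>
      if x ∈ J then
        (if PySem.List.pyGetD B x 0 ≠ PySem.List.pyGetD B (x + n) 0 then c + 1 else c)
      else
        (if PySem.List.pyGetD B x 0 = PySem.List.pyGetD B (x + n) 0 then c + 1 else c)) =
      (fun (c : Int) (x : Int) =>
        if (if x ∈ J then PySem.List.pyGetD B x 0 ≠ PySem.List.pyGetD B (x + n) 0
            else PySem.List.pyGetD B x 0 = PySem.List.pyGetD B (x + n) 0) then c + 1 else c) := by
    funext c x
    by_cases hxJ : x ∈ J <;> simp [hxJ]
  have hqY : (fun (c : Int) (y : Int) =>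
      if y ∈ J then c + 1
      else (if PySem.List.pyGetD B y 0 ≠ PySem.List.pyGetD B (y + n) 0 then c + 1 else c)) =
      (fun (c : Int) (y : Int) =>
        if (y ∈ J ∨ PySem.List.pyGetD B y 0 ≠ PySem.List.pyGetD B (y + n) 0) then c + 1 else c) := by
    funext c y
    by_cases hyJ : y ∈ J
    · simp [hyJ]
    · simp [hyJ]
  rw [hqX, hqY, PySem.List.foldl_ite_add_one, PySem.List.foldl_ite_add_one]
  rw [zero_add]
  set cX := XX.countP (fun x => decide (if x ∈ J then PySem.List.pyGetD B x 0 ≠ PySem.List.pyGetD B (x + n) 0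
            else PySem.List.pyGetD B x 0 = PySem.List.pyGetD B (x + n) 0)) with hcX
  set cY := YY.countP (fun y => decide (y ∈ J ∨ PySem.List.pyGetD B y 0 ≠ PySem.List.pyGetD B (y + n) 0)) with hcY
  have hbX : cX ≤ XX.length := List.countP_le_length
  have hbY : cY ≤ YY.length := List.countP_le_length
  have hsum : ((cX : Int) + (cY : Int) = n) ↔ (cX = XX.length ∧ cY = YY.length) := by omega
  rw [hsum]
  rw [hcX, hcY, List.countP_eq_length, List.countP_eq_length]
  simp only [decide_eq_true_eq]
  constructor
  · rintro ⟨hX, hY⟩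
    intro t ht
    have ht0 : (0 : Int) ≤ (t : Int) := by omega
    have htn : (t : Int) < n := by omega
    obtain ⟨hd1, hd2⟩ := hdig (t : Int) ht0 htn
    have htt : ((t : Int)).toNat = t := by omega
    rw [htt] at hd1 hd2
    unfold pvCond
    by_cases hXX : (t : Int) ∈ XX
    · rw [if_pos hXX]
      have := hX _ hXX
      rw [hd1, hd2] at this
      by_cases hJ : (t : Int) ∈ J
      · rw [if_pos hJ]; rw [if_pos hJ] at this
        intro hc; exact this (by exact_mod_cast congrArg (Nat.cast : ℕ → Int) hc)
      · rw [if_neg hJ]; rw [if_neg hJ] at this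
        exact_mod_cast this
    · rw [if_neg hXX]
      have hyy : (t : Int) ∈ YY := (hymem _).mpr ⟨ht0, htn, hXX⟩
      have := hY _ hyy
      rw [hd1, hd2] at this
      rcases this with h | h
      · exact Or.inl h
      · exact Or.inr (fun hc => h (by exact_mod_cast congrArg (Nat.cast : ℕ → Int) hc))
  · intro hpp
    constructor
    · intro x hx
      obtain ⟨hx0, hxn⟩ := hm x hx
      obtain ⟨hd1, hd2⟩ := hdig x hx0 hxn
      have hx' : x = ((x.toNat : ℕ) : Int) := by omega
      have := hpp x.toNat (by omega)
      rw [← hx'] at this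
      unfold pvCond at this
      rw [if_pos hx] at this
      by_cases hJ : x ∈ J
      · rw [if_pos hJ] at this; rw [if_pos hJ]
        rw [hd1, hd2]
        intro hc
        exact this (by exact_mod_cast hc)
      · rw [if_neg hJ] at this; rw [if_neg hJ]
        rw [hd1, hd2]
        exact_mod_cast this
    · intro y hy
      obtain ⟨hy0, hyn, hyXX⟩ := (hymem y).mp hy
      obtain ⟨hd1, hd2⟩ := hdig y hy0 hyn
      have hy' : y = ((y.toNat : ℕ) : Int) := by omega
      have := hpp y.toNat (by omega)
      rw [← hy'] at this
      unfold pvCond at this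
      rw [if_neg hyXX] at this
      rcases this with h | h
      · exact Or.inl h
      · refine Or.inr ?_
        rw [hd1, hd2]
        intro hc
        exact h (by exact_mod_cast hc)


lemma pvLB_facts (n : Int) (hn : 0 ≤ n) (J XX : List Int) :
    ((PySem.List.pyRange 0 ((2 : Int) ^ n.toNat) 1).flatMap
        (fun h => (pvLows n J XX h n.toNat).map (fun lo => h * (2 : Int) ^ n.toNat + lo))).Pairwise (· < ·) ∧
    (∀ i : Int, i ∈ (PySem.List.pyRange 0 ((2 : Int) ^ n.toNat) 1).flatMap
        (fun h => (pvLows n J XX h n.toNat).map (fun lo => h * (2 : Int) ^ n.toNat + lo)) ↔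
      (0 ≤ i ∧ i < (2 : Int) ^ (2 * n).toNat ∧ pvPP n J XX i)) := by
  set N := n.toNat with hN
  have hNc : ((N : ℕ) : Int) = n := by omega
  have h2N : ((2 ^ N : ℕ) : Int) = (2 : Int) ^ N := by push_cast; ring
  have h22N : ((2 ^ (2 * N) : ℕ) : Int) = (2 : Int) ^ (2 * n).toNat := by
    rw [show (2 * n).toNat = 2 * N from by omega]; push_cast; ring
  -- elements of a block have the stated bit characterization
  constructor
  · rw [List.pairwise_flatMap]
    constructor
    · intro h hmemh
      rw [PySem.List.mem_pyRange_one] at hmemh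
      have hH : h = ((h.toNat : ℕ) : Int) := by omega
      obtain ⟨hpw, hbound, -⟩ := pvLows_props n hn J XX h.toNat N (le_refl N)
      rw [← hH] at hpw
      exact List.Pairwise.map _ (fun a b hab => by omega) hpw
    · have hpr := PySem.List.pairwise_lt_pyRange_one 0 ((2 : Int) ^ N)
      apply hpr.imp_of_mem
      intro h1 h2 hm1 hm2 hlt x hx y hy
      rw [PySem.List.mem_pyRange_one] at hm1 hm2
      obtain ⟨c1, hc1, rfl⟩ := List.mem_map.mp hx
      obtain ⟨c2, hc2, rfl⟩ := List.mem_map.mp hy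
      have hH1 : h1 = ((h1.toNat : ℕ) : Int) := by omega
      have hH2 : h2 = ((h2.toNat : ℕ) : Int) := by omega
      obtain ⟨-, hbound1, -⟩ := pvLows_props n hn J XX h1.toNat N (le_refl N)
      obtain ⟨-, hbound2, -⟩ := pvLows_props n hn J XX h2.toNat N (le_refl N)
      rw [← hH1] at hbound1
      rw [← hH2] at hbound2
      obtain ⟨v1, rfl, hv1⟩ := hbound1 c1 hc1
      obtain ⟨v2, rfl, hv2⟩ := hbound2 c2 hc2
      have hv1' : (v1 : Int) < (2 : Int) ^ N := by
        rw [← h2N]; exact_mod_cast hv1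
      have hv2' : (0 : Int) ≤ (v2 : Int) := by positivity
      nlinarith [pow_pos (show (0:Int) < 2 by norm_num) N]
  · intro i
    rw [List.mem_flatMap]
    constructor
    · rintro ⟨h, hmemh, hx⟩
      obtain ⟨lo, hlo, rfl⟩ := List.mem_map.mp hx
      rw [PySem.List.mem_pyRange_one] at hmemh
      have hH : h = ((h.toNat : ℕ) : Int) := by omega
      set H := h.toNat with hHdef
      obtain ⟨-, hbound, hmem⟩ := pvLows_props n hn J XX H N (le_refl N)
      rw [← hH] at hbound hmem
      obtain ⟨v, rfl, hv⟩ := hbound lo hlo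
      have hHN : H < 2 ^ N := by
        have : h < (2 : Int) ^ N := hmemh.2
        rw [← h2N] at this
        omega
      have hMi : (h * (2 : Int) ^ N + (v : Int)) = ((H * 2 ^ N + v : ℕ) : Int) := by
        rw [hH]; push_cast; ring
      set M := H * 2 ^ N + v with hMdef
      have hM2 : M < 2 ^ (2 * N) := by
        have h1 : M < 2 ^ N * 2 ^ N := by
          have ha : (H + 1) * 2 ^ N = H * 2 ^ N + 2 ^ N := by ring
          have hb : (H + 1) * 2 ^ N ≤ 2 ^ N * 2 ^ N := Nat.mul_le_mul_right _ (Nat.succ_le_of_lt hHN)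
          omega
        rw [← pow_add] at h1
        rw [show 2 * N = N + N from by omega]
        exact h1
      refine ⟨by rw [hMi]; positivity, by rw [hMi, ← h22N]; exact_mod_cast hM2, ?_⟩
      intro t ht
      have hMt : (h * (2 : Int) ^ N + (v : Int)).toNat = M := by
        rw [hMi]; omega
      rw [hMt]
      have hhi : 2 * N - 1 - t = N + (N - 1 - t) := by omega
      rw [hhi, pvBitI_hi H v N _ hv, pvBitI_lo H v N _ (by omega)]
      exact (hmem v hv).mp hlo t ht
    · rintro ⟨hi0, hi2, hpp⟩
      set M := i.toNat with hMdef
      have hM2 : M < 2 ^ (2 * N) := by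
        rw [← h22N] at hi2
        omega
      set H := M / 2 ^ N with hHdef
      set v := M % 2 ^ N with hvdef
      have hHN : H < 2 ^ N := by
        rw [hHdef]
        apply Nat.div_lt_of_lt_mul
        rw [← pow_add, ← show 2 * N = N + N from by omega]
        exact hM2
      have hvN : v < 2 ^ N := Nat.mod_lt _ (Nat.two_pow_pos N)
      have hsplit : H * 2 ^ N + v = M := by
        have := Nat.div_add_mod M (2 ^ N)
        rw [mul_comm] at this
        exact this
      obtain ⟨-, -, hmem⟩ := pvLows_props n hn J XX H N (le_refl N)
      refine ⟨((H : ℕ) : Int), ?_, ?_⟩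
      · rw [PySem.List.mem_pyRange_one]
        constructor
        · positivity
        · rw [← h2N]; exact_mod_cast hHN
      · apply List.mem_map.mpr
        refine ⟨((v : ℕ) : Int), ?_, ?_⟩
        · apply (hmem v hvN).mpr
          intro s hs
          have := hpp s hs
          rw [← hMdef, ← hsplit] at this
          rw [show 2 * N - 1 - s = N + (N - 1 - s) from by omega] at this
          rw [pvBitI_hi H v N _ hvN, pvBitI_lo H v N _ (by omega)] at this
          exact this
        · have h1 : ((H : ℕ) : Int) * (2 : Int) ^ N + ((v : ℕ) : Int) = ((H * 2 ^ N + v : ℕ) : Int) := by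
            push_cast; ring
          rw [h1, hsplit]
          omega


-- ---- the inner per-subset loops agree ----
lemma pvInner (n : Int) (hn : 0 ≤ n) (J : List Int) (XX : List Int)
    (hs : XX.Pairwise (· < ·)) (hm : ∀ x ∈ XX, 0 ≤ x ∧ x < n) (KEYS : List Int) :
    (let YY : List Int :=
        PySem.Set.diff (PySem.Set.ofList (PySem.List.pyRange 0 n 1)) (PySem.Set.ofList XX)
     (PySem.List.pyRange 0 ((2 : Int) ^ (2 * n).toNat) 1).foldl
        (fun KEYS i =>
          let B := fmtBin (2 * n) i
          let count1 : Int :=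
            XX.foldl (fun c x =>
              if x ∈ J then
                (if PySem.List.pyGetD B x 0 ≠ PySem.List.pyGetD B (x + n) 0 then c + 1 else c)
              else
                (if PySem.List.pyGetD B x 0 = PySem.List.pyGetD B (x + n) 0 then c + 1 else c)) 0
          let count2 : Int :=
            YY.foldl (fun c y =>
              if y ∈ J then c + 1
              else (if PySem.List.pyGetD B y 0 ≠ PySem.List.pyGetD B (y + n) 0 then c + 1 else c)) count1
          if count2 = n then KEYS ++ [i] else KEYS)
        KEYS) =
    ((PySem.List.pyRange 0 ((2 : Int) ^ n.toNat) 1).foldl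
        (fun keys (h : Int) =>
          let lows := (PySem.List.pyRange 0 n 1).foldl
            (fun lows t =>
              let b := PySem.Int.band (h >>> (n - 1 - t).toNat) 1
              let opts := if PySem.Set.contains (PySem.Set.ofList XX) t then (if t ∈ J then [1 - b] else [b])
                          else (if t ∈ J then [0, 1] else [1 - b])
              lows.flatMap (fun lo => opts.map (fun c => lo * 2 + c))) [0]
          lows.foldl (fun keys lo => keys ++ [h * (2 : Int) ^ n.toNat + lo]) keys)
        KEYS) := by
  simp only []
  have hNc : ((n.toNat : ℕ) : Int) = n := Int.toNat_of_nonneg hn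
  -- the B-side inner fold is pvLows
  have hlows : ∀ h : Int, (PySem.List.pyRange 0 n 1).foldl
      (fun lows t =>
        let b := PySem.Int.band (h >>> (n - 1 - t).toNat) 1
        let opts := if PySem.Set.contains (PySem.Set.ofList XX) t then (if t ∈ J then [1 - b] else [b])
                    else (if t ∈ J then [0, 1] else [1 - b])
        lows.flatMap (fun lo => opts.map (fun c => lo * 2 + c))) [0] = pvLows n J XX h n.toNat := by
    intro h
    unfold pvLows
    rw [hNc]
    rfl
  -- rewrite the B side to a flatMap
  have hBfun : ∀ (keys : List Int) (h : Int), h ∈ PySem.List.pyRange 0 ((2 : Int) ^ n.toNat) 1 →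
      (fun keys (h : Int) =>
        let lows := (PySem.List.pyRange 0 n 1).foldl
          (fun lows t =>
            let b := PySem.Int.band (h >>> (n - 1 - t).toNat) 1
            let opts := if PySem.Set.contains (PySem.Set.ofList XX) t then (if t ∈ J then [1 - b] else [b])
                        else (if t ∈ J then [0, 1] else [1 - b])
            lows.flatMap (fun lo => opts.map (fun c => lo * 2 + c))) [0]
        lows.foldl (fun keys lo => keys ++ [h * (2 : Int) ^ n.toNat + lo]) keys) keys h =
      keys ++ (pvLows n J XX h n.toNat).map (fun lo => h * (2 : Int) ^ n.toNat + lo) := by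
    intro keys h _
    simp only []
    rw [hlows h, PySem.List.foldl_append_singleton_eq_map (fun lo => h * (2 : Int) ^ n.toNat + lo)]
  rw [PySem.List.foldl_congr_mem _ _ _ _ (fun keys h hh => hBfun keys h hh)]
  rw [PySem.List.foldl_append_eq_flatMap]
  rw [PySem.List.foldl_append_ite_eq_filter]
  congr 1
  obtain ⟨hLBpw, hLBmem⟩ := pvLB_facts n hn J XX
  apply pvSortedExt
  · exact (PySem.List.pairwise_lt_pyRange_one 0 ((2 : Int) ^ (2 * n).toNat)).filter _
  · exact hLBpw
  · intro i
    rw [List.mem_filter, PySem.List.mem_pyRange_one, decide_eq_true_eq, hLBmem i]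
    constructor
    · rintro ⟨⟨hi0, hi2⟩, hc⟩
      exact ⟨hi0, hi2, (pvCount_iff n hn J XX hs hm i hi0 hi2).mp hc⟩
    · rintro ⟨hi0, hi2, hpp⟩
      exact ⟨⟨hi0, hi2⟩, (pvCount_iff n hn J XX hs hm i hi0 hi2).mpr hpp⟩

-- ===== VERDICT (by name: the statement is the Claim_ definition above) =====
theorem count_keys_WK_small_spec : Claim_equal_count_keys_WK_small := by
  intro n J d _dom hpre
  unfold Spec_count_keys_WK_small count_keys_WK_small count_keys_WK_small_alt
  by_cases hn : 0 ≤ n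
  · refine PySem.List.foldl_congr_mem _ _ _ _ ?_
    intro acc XX hXX
    obtain ⟨hs, hm⟩ := pvCombsA_members n d XX hXX
    exact pvInner n hn J XX hs hm acc
  · have hd : 0 < d := hpre.resolve_left hn
    have hnil : PySem.List.pyRange 0 n 1 = [] :=
      PySem.List.pyRange_one_eq_nil (by omega)
    have hII : combsA (PySem.List.pyRange 0 n 1) d = [] := by
      rw [hnil]; unfold combsA
      have : d > PySem.List.len ([] : List Int) := by
        simp only [PySem.List.len_eq, List.length_nil, Nat.cast_zero]; omega
      simp only [this, if_pos]
    rw [hII]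
    rfl
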